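-- pv_equiv track=rewrite | github.com/pmassolino/hw-sike | zedboard_python/sike_core_utils.py | unsigned_integer_to_list
-- ===== SOURCE A (Python) =====
-- def unsigned_integer_to_list(word_size, list_size, a):
--     list_a = list_size*[0]
--     word_modulus = 2**(word_size)
--     word_full_of_ones = word_modulus - 1
--     j = a
--     for i in range(0, list_size):
--         list_a[i] = (j)&(word_full_of_ones)
--         j = j//word_modulus
--     return list_a
-- ===== SOURCE B (Python) =====
-- def _digits(x, n, ws):
--     # x (0 <= x < 2**(ws*n)) split into exactly n base-2**ws digits, little-endian,
--     # by halving the digit count (divide and conquer); the divmod is skipped when the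
--     # high half is empty, so the 2**(ws*h) modulus is never built needlessly.
--     if n == 1:
--         return [x]
--     if x == 0:
--         return [0] * n
--     h = n // 2
--     if x.bit_length() <= ws * h:
--         q, r = 0, x
--     else:
--         q, r = divmod(x, 1 << (ws * h))
--     return _digits(r, h, ws) + _digits(q, n - h, ws)
--
--
-- def unsigned_integer_to_list(word_size, list_size, a):
--     if list_size <= 0:
--         return []
--     x = ~a if a < 0 else a
--     if x.bit_length() > word_size * list_size:
--         x %= 1 << (word_size * list_size)
--     ds = _digits(x, list_size, word_size)
--     if a < 0:
--         mask = (1 << word_size) - 1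
--         return [mask - d for d in ds]
--     return ds
-- ===== Notes on version B (the rewrite author's own statement) =====
-- stated objective: faster
-- what changed: B replaces A's word-by-word mask-and-shift loop by a divide-and-conquer radix conversion: negative a is handled through its nonnegative complement ~a, the input is reduced modulo 2^(word_size*list_size) only when its bit length requires it, and the digit count is then halved recursively with one divmod per split.
import Mathlib
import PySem

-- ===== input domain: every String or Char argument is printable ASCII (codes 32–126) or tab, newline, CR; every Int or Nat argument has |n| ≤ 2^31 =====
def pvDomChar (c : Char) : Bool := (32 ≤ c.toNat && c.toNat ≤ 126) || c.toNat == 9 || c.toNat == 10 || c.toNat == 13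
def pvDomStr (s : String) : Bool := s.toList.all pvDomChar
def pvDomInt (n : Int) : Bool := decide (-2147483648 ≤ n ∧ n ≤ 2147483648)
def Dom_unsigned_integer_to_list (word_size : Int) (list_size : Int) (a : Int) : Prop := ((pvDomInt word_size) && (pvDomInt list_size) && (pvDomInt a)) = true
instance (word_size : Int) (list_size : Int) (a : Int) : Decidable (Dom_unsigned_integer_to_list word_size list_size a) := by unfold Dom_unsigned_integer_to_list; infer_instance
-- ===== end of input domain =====

-- B replaces A's word-by-word mask-and-shift loop by a divide-and-conquer radix split
-- (complement negative a, reduce mod 2^(word_size*list_size) only when the bit length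
-- requires it, then halve the digit count recursively): a different conversion algorithm,
-- measured faster in a timing run, with the same exact behaviour on Pre_.


-- ===== PORT A =====
-- literal port of A: pre-allocated zero list, loop i in range(list_size) writing
-- list_a[i] = j & (2^word_size - 1) and updating j = j // 2^word_size.
-- '2 ** word_size' is ported as '2 ^ word_size.toNat': exact for word_size ≥ 0; for
-- word_size < 0 Python's 2**word_size is a float and A raises TypeError at 'j & …'
-- unless the loop is empty (list_size ≤ 0, where the result [] agrees) — Pre_ excludes that.
def unsigned_integer_to_list (word_size : Int) (list_size : Int) (a : Int) : List Int :=
  let word_modulus : Int := 2 ^ word_size.toNat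
  let word_full_of_ones : Int := word_modulus - 1
  let list_a : List Int := List.replicate list_size.toNat 0
  let r := (PySem.List.pyRange 0 list_size).foldl
    (fun (st : List Int × Int) i =>
      (st.1.set i.toNat (PySem.Int.band st.2 word_full_of_ones),
       PySem.Int.floordiv st.2 word_modulus))
    (list_a, a)
  r.1

-- ===== PORT B =====
-- port of Source B's helper _digits(x, n, ws): the digit count n is a positive count, kept
-- as a Nat; the 'n = 0 → []' arm is only a totality guard (Source B never calls it with n ≤ 0).
-- '1 << (ws * h)' is ported as '1 <<< (ws*h).toNat': exact for ws ≥ 0 (Python raises for ws < 0);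
-- x.bit_length() is PySem.Int.bitLength (Python-exact).
def pvDigits (ws : Int) (x : Int) (n : Nat) : List Int :=
  match n with
  | 0 => []
  | 1 => [x]
  | (m + 2) =>
    if x = 0 then List.replicate (m + 2) 0
    else
      let h : Nat := (m + 2) / 2
      let qr : Int × Int :=
        if ((PySem.Int.bitLength x : Int)) ≤ ws * (h : Int) then (0, x)
        else (PySem.Int.floordiv x ((1 : Int) <<< (ws * (h : Int)).toNat),
              PySem.Int.mod x ((1 : Int) <<< (ws * (h : Int)).toNat))
      pvDigits ws qr.2 h ++ pvDigits ws qr.1 (m + 2 - h)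
termination_by n
decreasing_by all_goals omega

def unsigned_integer_to_list_alt (word_size : Int) (list_size : Int) (a : Int) : List Int :=
  if list_size ≤ 0 then []
  else
    let x0 : Int := if a < 0 then -a - 1 else a
    let x : Int := if ((PySem.Int.bitLength x0 : Int)) > word_size * list_size
      then PySem.Int.mod x0 ((1 : Int) <<< (word_size * list_size).toNat) else x0
    let ds := pvDigits word_size x list_size.toNat
    if a < 0 then ds.map (fun d => ((1 : Int) <<< word_size.toNat) - 1 - d) else ds

-- ===== PRECONDITION & SPEC =====
-- A raises TypeError when word_size < 0 and the loop runs (2**word_size is a float);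
-- it returns normally exactly when word_size ≥ 0 or list_size ≤ 0 (empty loop).
def Pre_unsigned_integer_to_list (word_size : Int) (list_size : Int) (a : Int) : Prop :=
  0 ≤ word_size ∨ list_size ≤ 0
instance (word_size : Int) (list_size : Int) (a : Int) : Decidable (Pre_unsigned_integer_to_list word_size list_size a) := by unfold Pre_unsigned_integer_to_list; infer_instance
def pvWitness_unsigned_integer_to_list : Int × Int × Int := (8, 3, 1000)
def Spec_unsigned_integer_to_list (word_size : Int) (list_size : Int) (a : Int) (out : List Int) : Prop := out = unsigned_integer_to_list_alt word_size list_size a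
instance (word_size : Int) (list_size : Int) (a : Int) (out : List Int) : Decidable (Spec_unsigned_integer_to_list word_size list_size a out) := by unfold Spec_unsigned_integer_to_list; infer_instance

-- ===== CLAIM (what is proved, stated in full; the proofs are below) =====
def Claim_equal_unsigned_integer_to_list : Prop := ∀ (word_size : Int) (list_size : Int) (a : Int), Dom_unsigned_integer_to_list word_size list_size a → Pre_unsigned_integer_to_list word_size list_size a → Spec_unsigned_integer_to_list word_size list_size a (unsigned_integer_to_list word_size list_size a)

-- ===== LEMMAS AND PROOFS =====

theorem pv_neg_one_emod (M : Int) (hM : 1 ≤ M) : (-1 : Int) % M = M - 1 := by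
  have h : (-1 : Int) = (M - 1) + M * (-1) := by ring
  rw [h, Int.add_mul_emod_self_left, Int.emod_eq_of_lt (by omega) (by omega)]

-- Python's j & (2^k - 1) is j mod 2^k, also for negative j.
theorem pv_band_mask (a : Int) (k : Nat) :
    PySem.Int.band a ((2 : Int) ^ k - 1) = a % 2 ^ k := by
  have hM : (1 : Int) ≤ 2 ^ k := one_le_pow₀ (by omega)
  have hcast : ((2 : Int) ^ k) = ((2 ^ k : Nat) : Int) := by push_cast; ring
  have htn : ((2 : Int) ^ k - 1).toNat = 2 ^ k - 1 := by omega
  rcases (show 0 ≤ a ∨ a < 0 by omega) with ha | ha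
  · rw [PySem.Int.band_of_nonneg ha (by omega), htn, Nat.and_two_pow_sub_one_eq_mod]
    have h2 : a = ((a.toNat : Nat) : Int) := by omega
    rw [h2, hcast, Int.natCast_mod]; simp
  · have hb : (0 : Int) ≤ 2 ^ k - 1 := by omega
    have hband : PySem.Int.band a ((2:Int)^k - 1)
          = (((((2:Int)^k - 1).toNat - (((2:Int)^k - 1).toNat &&& (-a - 1).toNat) : Nat)) : Int) := by
      simp only [PySem.Int.band, if_neg (by omega : ¬ (0:Int) ≤ a), if_pos hb]
    rw [hband, htn, Nat.and_comm, Nat.and_two_pow_sub_one_eq_mod]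
    set n : Nat := (-a - 1).toNat with hn
    have hna : a = -1 - (n : Int) := by omega
    have hr : (n % 2 ^ k : Nat) < 2 ^ k := Nat.mod_lt _ (by positivity)
    have hgoal : (-1 - (n : Int)) % 2 ^ k = 2 ^ k - 1 - ((n % 2 ^ k : Nat) : Int) := by
      rw [Int.sub_emod, pv_neg_one_emod _ hM, hcast, Int.natCast_mod]
      rw [Int.emod_eq_of_lt (by omega) (by omega)]
    rw [hna, hgoal]
    omega

-- (-1 - z) mod 2^k complements the residue
theorem pv_neg_sub_emod (z W : Int) (hW : 1 ≤ W) : (-1 - z) % W = W - 1 - z % W := by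
  have h0 : 0 ≤ z % W := Int.emod_nonneg z (by omega)
  have h1 : z % W < W := Int.emod_lt_of_pos z (by omega)
  rw [Int.sub_emod, pv_neg_one_emod _ hW, Int.emod_eq_of_lt (by omega) (by omega)]

-- floor division of -1 - y mirrors that of y
theorem pv_neg_sub_ediv (y M : Int) (hM : 0 < M) : (-1 - y) / M = -1 - y / M := by
  have h0 : 0 ≤ y % M := Int.emod_nonneg y (by omega)
  have h1 : y % M < M := Int.emod_lt_of_pos y hM
  have hy : -1 - y = (M - 1 - y % M) + M * (-1 - y / M) := by
    have := Int.emod_add_mul_ediv y M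
    linarith
  rw [hy, Int.add_mul_ediv_left _ _ (by omega : M ≠ 0),
      Int.ediv_eq_zero_of_lt (by omega) (by omega)]
  ring

-- a bit-length bound is a power-of-two bound
theorem pv_bitLength_lt (x : Int) (t : Nat) (hx : 0 ≤ x)
    (h : PySem.Int.bitLength x ≤ t) : x < 2 ^ t := by
  have h1 : x.natAbs < 2 ^ PySem.Int.bitLength x := PySem.Int.lt_two_pow_bitLength x
  have h2 : (2 : Nat) ^ PySem.Int.bitLength x ≤ 2 ^ t := Nat.pow_le_pow_right (by omega) h
  have h3 : x = ((x.natAbs : Nat) : Int) := by omega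
  rw [h3]
  calc ((x.natAbs : Nat) : Int) < ((2 ^ t : Nat) : Int) := by exact_mod_cast Nat.lt_of_lt_of_le h1 h2
    _ = 2 ^ t := by push_cast; ring

-- digit i only depends on x mod 2^(k*d) for i < d
theorem pv_low_digit (k i d : Nat) (x : Int) (hid : i < d) :
    (x % 2 ^ (k * d)) / 2 ^ (k * i) % 2 ^ k = x / 2 ^ (k * i) % 2 ^ k := by
  have hk1 : k * i + k ≤ k * d := by nlinarith [Nat.succ_le_of_lt hid]
  have hsplit : (2 : Int) ^ (k * d) = 2 ^ (k * i) * (2 ^ k * 2 ^ (k * d - (k * i + k))) := by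
    rw [← pow_add, ← pow_add]; congr 1; omega
  have hx : x = x % 2 ^ (k * d) + 2 ^ (k * i) * ((2 ^ k * 2 ^ (k * d - (k * i + k))) * (x / 2 ^ (k * d))) := by
    have h := Int.emod_add_mul_ediv x (2 ^ (k * d))
    rw [hsplit] at h ⊢; linarith [h]
  conv_rhs => rw [hx]
  rw [Int.add_mul_ediv_left _ _ (by positivity : (2:Int) ^ (k*i) ≠ 0)]
  rw [mul_assoc, Int.add_mul_emod_self_left]

-- digit (h+i) of x is digit i of x / 2^(k*h)
theorem pv_high_digit (k i h : Nat) (x : Int) :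
    (x / 2 ^ (k * h)) / 2 ^ (k * i) % 2 ^ k = x / 2 ^ (k * (h + i)) % 2 ^ k := by
  rw [Int.ediv_ediv_of_nonneg (by positivity), ← pow_add]
  congr 3
  ring

-- A's loop characterised: after n iterations the first n slots hold the digits and j = a / 2^(k*n)
theorem pv_loopA (k : Nat) (j : Int) (n : Nat) (l : List Int) (hn : n ≤ l.length) :
    (List.range n).foldl
      (fun (st : List Int × Int) (i : Nat) =>
        (st.1.set i (PySem.Int.band st.2 ((2 : Int) ^ k - 1)),
         PySem.Int.floordiv st.2 (2 ^ k)))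
      (l, j)
    = ((List.range n).map (fun i => j / (2 : Int) ^ (k * i) % 2 ^ k) ++ l.drop n,
       j / (2 : Int) ^ (k * n)) := by
  have hpos : (0 : Int) < 2 ^ k := by positivity
  induction n with
  | zero => simp
  | succ m ih =>
    have hm : m ≤ l.length := by omega
    rw [List.range_succ, List.foldl_append, ih hm, List.map_append]
    simp only [List.foldl_cons, List.foldl_nil, List.map_cons, List.map_nil]
    rw [Prod.mk.injEq]
    refine ⟨?_, ?_⟩
    · rw [pv_band_mask]
      rw [List.set_append_right _ _ (by simp)]
      simp only [List.length_map, List.length_range, Nat.sub_self]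
      rw [List.drop_eq_getElem_cons (show m < l.length by omega), List.set_cons_zero,
          List.append_assoc, List.singleton_append]
    · rw [PySem.Int.floordiv_eq_ediv_of_pos hpos,
          Int.ediv_ediv_of_nonneg (by positivity), ← pow_add,
          show k * m + k = k * (m + 1) from by ring]

-- B's divide-and-conquer characterised
theorem pv_digits_spec (ws : Int) (hws : 0 ≤ ws) (n : Nat) (x : Int)
    (h1 : 1 ≤ n) (hx0 : 0 ≤ x) (hxlt : x < 2 ^ (ws.toNat * n)) :
    pvDigits ws x n
      = (List.range n).map (fun i => x / (2 : Int) ^ (ws.toNat * i) % 2 ^ ws.toNat) := by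
  set k := ws.toNat with hk
  induction n using Nat.strong_induction_on generalizing x with
  | _ n ih =>
    match n, h1 with
    | 1, _ =>
      simp only [pvDigits, List.range_one, List.map_cons, List.map_nil]
      rw [Nat.mul_one] at hxlt
      rw [Nat.mul_zero, pow_zero, Int.ediv_one, Int.emod_eq_of_lt hx0 hxlt]
    | (m + 2), _ =>
      rw [pvDigits]
      by_cases hx : x = 0
      · rw [if_pos hx, hx]
        have : (fun i => (0:Int) / (2 : Int) ^ (k * i) % 2 ^ k) = fun (_ : Nat) => (0:Int) := by
          funext i
          rw [Int.zero_ediv, Int.zero_emod]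
        rw [this, List.map_const', List.length_range]
      rw [if_neg hx]
      set h : Nat := (m + 2) / 2 with hh
      have hh1 : 1 ≤ h := by omega
      have hh2 : h < m + 2 := by omega
      have hWh : (0 : Int) < 2 ^ (k * h) := by positivity
      have hsh : ((1 : Int) <<< (ws * (h : Int)).toNat) = 2 ^ (k * h) := by
        rw [Int.shiftLeft_eq, one_mul]
        congr 1
        rw [Int.toNat_mul hws (by positivity), hk]
        simp
      have hqr : (if ((PySem.Int.bitLength x : Int)) ≤ ws * (h : Int) then ((0 : Int), x)
          else (PySem.Int.floordiv x ((1 : Int) <<< (ws * (h : Int)).toNat),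
                PySem.Int.mod x ((1 : Int) <<< (ws * (h : Int)).toNat)))
          = (x / 2 ^ (k * h), x % 2 ^ (k * h)) := by
        by_cases htb : ((PySem.Int.bitLength x : Int)) ≤ ws * (h : Int)
        · rw [if_pos htb]
          have hws' : ws * (h : Int) = ((k * h : Nat) : Int) := by
            have hwsk : ws = (k : Int) := by omega
            rw [hwsk]
            push_cast
            ring
          have hbl : PySem.Int.bitLength x ≤ k * h := by
            rw [hws'] at htb
            exact_mod_cast htb
          have hlt : x < 2 ^ (k * h) := pv_bitLength_lt x (k * h) hx0 hbl
          rw [Int.ediv_eq_zero_of_lt hx0 hlt, Int.emod_eq_of_lt hx0 hlt]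
        · rw [if_neg htb, hsh, PySem.Int.floordiv_eq_ediv_of_pos hWh,
              PySem.Int.mod_eq_emod_of_pos hWh]
      simp only [hqr]
      have hrec1 : pvDigits ws (x % 2 ^ (k * h)) h
          = (List.range h).map (fun i => (x % 2 ^ (k * h)) / (2:Int) ^ (k * i) % 2 ^ k) := by
        exact ih h hh2 _ hh1 (Int.emod_nonneg x (by positivity)) (Int.emod_lt_of_pos x hWh)
      have hrec2 : pvDigits ws (x / 2 ^ (k * h)) (m + 2 - h)
          = (List.range (m + 2 - h)).map (fun i => (x / 2 ^ (k * h)) / (2:Int) ^ (k * i) % 2 ^ k) := by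
        refine ih (m + 2 - h) (by omega) _ (by omega) (Int.ediv_nonneg hx0 (by positivity)) ?_
        rw [Int.ediv_lt_iff_lt_mul hWh, ← pow_add]
        have hexp : k * (m + 2 - h) + k * h = k * (m + 2) := by
          rw [← Nat.mul_add]
          congr 1
          omega
        rw [hexp]
        exact hxlt
      rw [hrec1, hrec2]
      -- split the range
      conv_rhs => rw [show m + 2 = h + (m + 2 - h) from by omega, List.range_add, List.map_append]
      congr 1
      · refine List.map_congr_left ?_
        intro i hi
        rw [List.mem_range] at hi
        exact (pv_low_digit k i h x hi)
      · rw [List.map_map]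
        refine List.map_congr_left ?_
        intro i hi
        simp only [Function.comp]
        exact pv_high_digit k i h x

theorem pv_main (ws ls a : Int) (hpre : 0 ≤ ws ∨ ls ≤ 0) :
    unsigned_integer_to_list ws ls a = unsigned_integer_to_list_alt ws ls a := by
  by_cases hls : ls ≤ 0
  · have h1 : PySem.List.pyRange 0 ls = [] := by
      simp [PySem.List.pyRange]
      omega
    have h2 : ls.toNat = 0 := by omega
    simp [unsigned_integer_to_list, unsigned_integer_to_list_alt, h1, h2, if_pos hls]
  · have hws : 0 ≤ ws := hpre.resolve_right hls
    set k := ws.toNat with hk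
    set N := ls.toNat with hN
    have hlsN : ls = (N : Int) := by omega
    have hN1 : 1 ≤ N := by omega
    have hWN : (0 : Int) < 2 ^ (k * N) := by positivity
    -- A side
    have hA : unsigned_integer_to_list ws ls a
        = (List.range N).map (fun i => a / (2:Int) ^ (k * i) % 2 ^ k) := by
      simp only [unsigned_integer_to_list]
      rw [hlsN, PySem.List.pyRange_zero_natCast, List.foldl_map]
      simp only [Int.toNat_natCast, ← hk]
      rw [pv_loopA k a N (List.replicate N 0) (by simp)]
      simp
    -- B side
    have hshN : ((1 : Int) <<< (ws * ls).toNat) = 2 ^ (k * N) := by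
      rw [Int.shiftLeft_eq, one_mul]
      congr 1
      rw [Int.toNat_mul hws (by omega)]
    have hwlN : ws * ls = ((k * N : Nat) : Int) := by
      have hwsk : ws = (k : Int) := by omega
      rw [hwsk, hlsN]
      push_cast
      ring
    -- the reduction step yields x0 % 2^(k*N) in both branches
    have hred : ∀ x0 : Int, 0 ≤ x0 →
        (if ((PySem.Int.bitLength x0 : Int)) > ws * ls
          then PySem.Int.mod x0 ((1 : Int) <<< (ws * ls).toNat) else x0)
        = x0 % 2 ^ (k * N) := by
      intro x0 hx0
      by_cases hbl : ((PySem.Int.bitLength x0 : Int)) > ws * ls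
      · rw [if_pos hbl, hshN, PySem.Int.mod_eq_emod_of_pos hWN]
      · rw [if_neg hbl]
        have hble : PySem.Int.bitLength x0 ≤ k * N := by
          rw [hwlN] at hbl
          exact_mod_cast not_lt.mp hbl
        exact (Int.emod_eq_of_lt hx0 (pv_bitLength_lt x0 (k * N) hx0 hble)).symm
    have hdig : ∀ x0 : Int, 0 ≤ x0 → pvDigits ws (x0 % 2 ^ (k * N)) N
        = (List.range N).map (fun i => x0 / (2:Int) ^ (k * i) % 2 ^ k) := by
      intro x0 hx0
      rw [pv_digits_spec ws hws N _ hN1 (Int.emod_nonneg x0 (by positivity))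
        (Int.emod_lt_of_pos x0 hWN)]
      refine List.map_congr_left ?_
      intro i hi
      rw [List.mem_range] at hi
      exact pv_low_digit k i N x0 hi
    rw [hA]
    simp only [unsigned_integer_to_list_alt]
    rw [if_neg hls]
    by_cases ha : a < 0
    · rw [if_pos ha, if_pos ha, ← hN, hred (-a - 1) (by omega), hdig (-a - 1) (by omega),
          List.map_map]
      refine List.map_congr_left ?_
      intro i hi
      simp only [Function.comp]
      have hM : (1 : Int) ≤ 2 ^ k := one_le_pow₀ (by omega)
      rw [Int.shiftLeft_eq, one_mul, ← hk,
          show a = -1 - (-a - 1) from by ring,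
          pv_neg_sub_ediv _ _ (by positivity), pv_neg_sub_emod _ _ hM]
      ring_nf
    · rw [if_neg ha, if_neg ha, ← hN, hred a (by omega), hdig a (by omega)]

-- ===== VERDICT (by name: the statement is the Claim_ definition above) =====
theorem unsigned_integer_to_list_spec : Claim_equal_unsigned_integer_to_list := by
  intro ws ls a _ hpre
  unfold Spec_unsigned_integer_to_list Pre_unsigned_integer_to_list at *
  exact pv_main ws ls a hpre
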